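-- pv_equiv track=rewrite | github.com/akaszubski/autonomous-dev | plugins/autonomous-dev/lib/mcp_permission_validator.py | _has_command_injection
-- ===== SOURCE A (Python) =====
-- def _has_command_injection(command: str) -> bool:
--     """Check if command contains injection attempts (CWE-78).
--
--     Args:
--         command: Shell command to check
--
--     Returns:
--         True if command contains injection patterns
--     """
--     injection_patterns = [
--         ";",      # Command chaining
--         "&&",     # Command chaining
--         "||",     # Command chaining
--         "`",      # Backtick command substitution
--         "$(",     # Command substitution
--         "\n",     # Newline command separator
--     ]
--
--     # Check for injection patterns (excluding pipe which we check separately)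
--     for pattern in injection_patterns:
--         if pattern in command:
--             return True
--
--     # Check for pipe (needs special handling for download detection)
--     if "|" in command:
--         # Check if it's a download and execute pattern
--         command_lower = command.lower()
--         download_cmds = ["curl", "wget", "nc ", "netcat"]
--         if any(cmd in command_lower for cmd in download_cmds):
--             # This is a download | execute pattern, not just a pipe
--             return True
--         # Regular pipe is also injection
--         return True
--
--     return False
-- ===== SOURCE B (Python) =====
-- def _has_command_injection(command: str) -> bool:
--     """Single left-to-right scan: flag single-char separators ; ` | \n directly,
--     and the two-char patterns "$(" and "&&" by remembering the previous character.
--     ("||" needs no case of its own: any "||" already contains "|".)"""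
--     prev = ""
--     for ch in command:
--         if ch in ";`|\n":
--             return True
--         if (prev == "$" and ch == "(") or (prev == "&" and ch == "&"):
--             return True
--         prev = ch
--     return False
-- ===== Notes on version B (the rewrite author's own statement) =====
-- stated objective: alternative
-- what changed: Replaces A's seven independent substring scans (a pattern-list loop plus a special pipe branch with a dead download check) by one left-to-right character scan that remembers the previous character to detect the two-character patterns; the double-pipe pattern needs no own case since the single-pipe case subsumes it.
import Mathlib
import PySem

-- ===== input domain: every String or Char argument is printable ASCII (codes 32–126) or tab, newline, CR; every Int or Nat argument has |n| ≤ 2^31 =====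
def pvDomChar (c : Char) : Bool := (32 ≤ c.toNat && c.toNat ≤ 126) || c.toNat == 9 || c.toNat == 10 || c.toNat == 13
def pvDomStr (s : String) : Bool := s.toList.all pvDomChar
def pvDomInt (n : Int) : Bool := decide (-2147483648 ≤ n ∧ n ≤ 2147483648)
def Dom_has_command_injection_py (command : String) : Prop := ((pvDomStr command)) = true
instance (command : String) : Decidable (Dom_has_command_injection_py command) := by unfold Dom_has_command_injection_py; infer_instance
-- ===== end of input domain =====

-- B replaces A's seven independent substring scans by one left-to-right character
-- scan keeping the previous character (an alternative decomposition, not claimed faster).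


-- ===== PORT A =====
-- Literal port of A: loop over the pattern list with early return (List.any),
-- then the pipe branch with its download-command check kept as written.
def has_command_injection_py (command : String) : Bool :=
  let injection_patterns : List String := [";", "&&", "||", "`", "$(", "\n"]
  if injection_patterns.any (fun p => PySem.Str.isIn p command) then
    true
  else if PySem.Str.isIn "|" command then
    let command_lower := PySem.Str.lower command
    let download_cmds : List String := ["curl", "wget", "nc ", "netcat"]
    if download_cmds.any (fun c => PySem.Str.isIn c command_lower) then
      true
    else
      true
  else
    false

-- ===== PORT B =====
-- Port of B: one structural scan over the characters, carrying the previous character.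
def pvAltLoop : Option Char → List Char → Bool
  | _, [] => false
  | prev, c :: rest =>
    if c = ';' ∨ c = '`' ∨ c = '|' ∨ c = '\n' then true
    else if (prev = some '$' ∧ c = '(') ∨ (prev = some '&' ∧ c = '&') then true
    else pvAltLoop (some c) rest

def has_command_injection_py_alt (command : String) : Bool :=
  pvAltLoop none command.toList

-- ===== PRECONDITION & SPEC =====
def Spec_has_command_injection_py (command : String) (out : Bool) : Prop := out = has_command_injection_py_alt command
instance (command : String) (out : Bool) : Decidable (Spec_has_command_injection_py command out) := by unfold Spec_has_command_injection_py; infer_instance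

-- ===== CLAIM (what is proved, stated in full; the proofs are below) =====
def Claim_equal_has_command_injection_py : Prop := ∀ (command : String), Dom_has_command_injection_py command → Spec_has_command_injection_py command (has_command_injection_py command)

-- ===== LEMMAS AND PROOFS =====

-- a one-character substring is just membership
lemma singleton_infix_iff {α : Type} (c : α) (l : List α) : [c] <:+: l ↔ c ∈ l := by
  constructor
  · rintro ⟨s, t, rfl⟩; simp
  · intro h
    obtain ⟨s, t, rfl⟩ := List.append_of_mem h
    exact ⟨s, t, by simp⟩

-- two-character infix unfolds on cons
lemma pair_infix_cons_iff {α : Type} (a b c : α) (l : List α) :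
    [a, b] <:+: c :: l ↔ (a = c ∧ ∃ t, l = b :: t) ∨ [a, b] <:+: l := by
  rw [List.infix_cons_iff]
  constructor
  · rintro (h | h)
    · rw [List.cons_prefix_cons] at h
      obtain ⟨rfl, h⟩ := h
      rcases h with ⟨t, rfl⟩
      exact Or.inl ⟨rfl, t, rfl⟩
    · exact Or.inr h
  · rintro (⟨rfl, t, rfl⟩ | h)
    · exact Or.inl ⟨t, by simp⟩
    · exact Or.inr h

-- characterisation of B\'s scan
lemma pvAltLoop_true_iff (prev : Option Char) (l : List Char) :
    pvAltLoop prev l = true ↔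
      ((';' ∈ l ∨ '`' ∈ l ∨ '|' ∈ l ∨ '\n' ∈ l) ∨
       ['$', '('] <:+: l ∨ ['&', '&'] <:+: l) ∨
      (∃ t, (prev = some '$' ∧ l = '(' :: t) ∨ (prev = some '&' ∧ l = '&' :: t)) := by
  induction l generalizing prev with
  | nil => simp [pvAltLoop]
  | cons c rest ih =>
    rw [pvAltLoop]
    by_cases h1 : c = ';' ∨ c = '`' ∨ c = '|' ∨ c = '\n'
    · simp only [if_pos h1, true_iff]
      rcases h1 with rfl | rfl | rfl | rfl <;> simp
    · rw [if_neg h1]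
      by_cases h2 : (prev = some '$' ∧ c = '(') ∨ (prev = some '&' ∧ c = '&')
      · simp only [if_pos h2, true_iff]
        rcases h2 with ⟨hp, rfl⟩ | ⟨hp, rfl⟩
        · exact Or.inr ⟨rest, Or.inl ⟨hp, rfl⟩⟩
        · exact Or.inr ⟨rest, Or.inr ⟨hp, rfl⟩⟩
      · rw [if_neg h2, ih (some c)]
        push_neg at h1
        obtain ⟨hc1, hc2, hc3, hc4⟩ := h1
        constructor
        · rintro (((h | h | h | h) | h | h) | ⟨t, ⟨hc, rfl⟩ | ⟨hc, rfl⟩⟩)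
          · exact Or.inl (Or.inl (Or.inl (List.mem_cons_of_mem c h)))
          · exact Or.inl (Or.inl (Or.inr (Or.inl (List.mem_cons_of_mem c h))))
          · exact Or.inl (Or.inl (Or.inr (Or.inr (Or.inl (List.mem_cons_of_mem c h)))))
          · exact Or.inl (Or.inl (Or.inr (Or.inr (Or.inr (List.mem_cons_of_mem c h)))))
          · exact Or.inl (Or.inr (Or.inl (List.infix_cons_iff.2 (Or.inr h))))
          · exact Or.inl (Or.inr (Or.inr (List.infix_cons_iff.2 (Or.inr h))))
          · simp only [Option.some.injEq] at hc
            exact Or.inl (Or.inr (Or.inl ((pair_infix_cons_iff _ _ _ _).2 (Or.inl ⟨hc.symm, t, rfl⟩))))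
          · simp only [Option.some.injEq] at hc
            exact Or.inl (Or.inr (Or.inr ((pair_infix_cons_iff _ _ _ _).2 (Or.inl ⟨hc.symm, t, rfl⟩))))
        · rintro (((h | h | h | h) | h | h) | ⟨t, ⟨hp, heq⟩ | ⟨hp, heq⟩⟩)
          · rcases List.mem_cons.1 h with rfl | h
            · exact absurd rfl hc1
            · exact Or.inl (Or.inl (Or.inl h))
          · rcases List.mem_cons.1 h with rfl | h
            · exact absurd rfl hc2
            · exact Or.inl (Or.inl (Or.inr (Or.inl h)))
          · rcases List.mem_cons.1 h with rfl | h
            · exact absurd rfl hc3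
            · exact Or.inl (Or.inl (Or.inr (Or.inr (Or.inl h))))
          · rcases List.mem_cons.1 h with rfl | h
            · exact absurd rfl hc4
            · exact Or.inl (Or.inl (Or.inr (Or.inr (Or.inr h))))
          · rcases (pair_infix_cons_iff _ _ _ _).1 h with ⟨rfl, t, rfl⟩ | h
            · exact Or.inr ⟨t, Or.inl ⟨rfl, rfl⟩⟩
            · exact Or.inl (Or.inr (Or.inl h))
          · rcases (pair_infix_cons_iff _ _ _ _).1 h with ⟨rfl, t, rfl⟩ | h
            · exact Or.inr ⟨t, Or.inr ⟨rfl, rfl⟩⟩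
            · exact Or.inl (Or.inr (Or.inr h))
          · have : c = '(' := by injection heq
            exact absurd (Or.inl ⟨hp, this⟩) h2
          · have : c = '&' := by injection heq
            exact absurd (Or.inr ⟨hp, this⟩) h2

-- characterisation of A\'s result (the "||" pattern and the download branch collapse)
lemma portA_true_iff (command : String) :
    has_command_injection_py command = true ↔
      (';' ∈ command.toList ∨ '`' ∈ command.toList ∨ '|' ∈ command.toList ∨ '\n' ∈ command.toList) ∨
      ['$', '('] <:+: command.toList ∨ ['&', '&'] <:+: command.toList := by
  unfold has_command_injection_py
  simp only [List.any_cons, List.any_nil, Bool.or_false, Bool.or_eq_true,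
    PySem.Str.isIn_iff_infix]
  have hsemi : (";".toList : List Char) = [';'] := rfl
  have hamp : ("&&".toList : List Char) = ['&', '&'] := rfl
  have hpipe2 : ("||".toList : List Char) = ['|', '|'] := rfl
  have hbt : ("`".toList : List Char) = ['`'] := rfl
  have hdol : ("$(".toList : List Char) = ['$', '('] := rfl
  have hnl : ("\n".toList : List Char) = ['\n'] := rfl
  have hpipe : ("|".toList : List Char) = ['|'] := rfl
  rw [hsemi, hamp, hpipe2, hbt, hdol, hnl, hpipe]
  by_cases hany : ([';'] <:+: command.toList ∨ ['&', '&'] <:+: command.toList ∨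
      ['|', '|'] <:+: command.toList ∨ ['`'] <:+: command.toList ∨
      ['$', '('] <:+: command.toList ∨ ['\n'] <:+: command.toList)
  · rw [if_pos hany]
    refine ⟨fun _ => ?_, fun _ => rfl⟩
    rcases hany with h | h | h | h | h | h
    · exact Or.inl (Or.inl ((singleton_infix_iff _ _).1 h))
    · exact Or.inr (Or.inr h)
    · -- "||" infix gives '|' ∈ l
      obtain ⟨s, t, hst⟩ := h
      refine Or.inl (Or.inr (Or.inr (Or.inl ?_)))
      rw [← hst]; simp
    · exact Or.inl (Or.inr (Or.inl ((singleton_infix_iff _ _).1 h)))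
    · exact Or.inr (Or.inl h)
    · exact Or.inl (Or.inr (Or.inr (Or.inr ((singleton_infix_iff _ _).1 h))))
  · rw [if_neg hany]
    push_neg at hany
    obtain ⟨h1, h2, h3, h4, h5, h6⟩ := hany
    by_cases hp : ['|'] <:+: command.toList
    · rw [if_pos hp]
      constructor
      · intro _
        exact Or.inl (Or.inr (Or.inr (Or.inl ((singleton_infix_iff _ _).1 hp))))
      · intro _
        split <;> rfl
    · rw [if_neg hp]
      constructor
      · intro h; exact absurd h (by decide)
      · rintro ((h | h | h | h) | h | h)
        · exact absurd ((singleton_infix_iff _ _).2 h) h1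
        · exact absurd ((singleton_infix_iff _ _).2 h) h4
        · exact absurd ((singleton_infix_iff _ _).2 h) hp
        · exact absurd ((singleton_infix_iff _ _).2 h) h6
        · exact absurd h h5
        · exact absurd h h2

-- ===== VERDICT (by name: the statement is the Claim_ definition above) =====
theorem has_command_injection_py_spec : Claim_equal_has_command_injection_py := by
  intro command _
  unfold Spec_has_command_injection_py
  have hA := portA_true_iff command
  have hB := pvAltLoop_true_iff none command.toList
  have : has_command_injection_py command = true ↔
      has_command_injection_py_alt command = true := by
    rw [hA, has_command_injection_py_alt, hB]
    constructor
    · intro h; exact Or.inl h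
    · rintro (h | ⟨t, ⟨h, _⟩ | ⟨h, _⟩⟩)
      · exact h
      · exact absurd h (by simp)
      · exact absurd h (by simp)
  cases hA' : has_command_injection_py command <;>
    cases hB' : has_command_injection_py_alt command <;> simp_all
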